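-- pv_equiv track=rewrite | github.com/nuheajiohc/algorithm-study | 프로그래머스/lv2/12973. 짝지어 제거하기/짝지어 제거하기.py | solution
-- ===== SOURCE A (Python) =====
-- def solution(s):
--     answer = -1
--     stack=[]
--     for i in s:
--         if len(stack)==0:
--             stack.append(i)
--             continue
--         else:
--             if i==stack[-1]:
--                 stack.pop()
--             else:
--                 stack.append(i)
--     if len(stack):
--         answer=0
--     else :
--         answer=1
--     return answer
-- ===== SOURCE B (Python) =====
-- def solution(s):
--     # Fixpoint collapse: repeatedly delete adjacent equal pairs in one scan
--     # per pass until the string stops changing; empty result means 1.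
--     prev = None
--     cur = s
--     while cur != prev:
--         prev = cur
--         out = []
--         i = 0
--         while i < len(cur):
--             if i + 1 < len(cur) and cur[i] == cur[i + 1]:
--                 i += 2
--             else:
--                 out.append(cur[i])
--                 i += 1
--         cur = ''.join(out)
--     return 1 if cur == '' else 0
-- ===== Notes on version B (the rewrite author's own statement) =====
-- stated objective: idiomatic
-- what changed: Replaces A's single-pass explicit stack with a fixpoint loop that repeatedly deletes all adjacent equal pairs in one scan per pass until the string stops changing, then tests emptiness.
import Mathlib
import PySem

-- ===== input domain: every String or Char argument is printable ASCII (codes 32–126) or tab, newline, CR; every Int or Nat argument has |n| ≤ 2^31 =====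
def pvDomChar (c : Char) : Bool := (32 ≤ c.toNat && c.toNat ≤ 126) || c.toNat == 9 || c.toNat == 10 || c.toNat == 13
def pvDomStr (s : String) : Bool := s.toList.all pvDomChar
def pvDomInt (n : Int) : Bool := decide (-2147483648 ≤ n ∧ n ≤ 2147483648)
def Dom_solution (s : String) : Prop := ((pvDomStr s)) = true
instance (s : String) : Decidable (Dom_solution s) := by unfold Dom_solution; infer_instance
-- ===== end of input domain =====

-- B replaces A's single stack pass by an idiomatic fixpoint loop that repeatedly
-- deletes adjacent equal pairs in one scan per pass until the string is stable
-- (objective: idiomatic; not faster).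


-- ===== PORT A =====
-- Python's stack (append / stack[-1] / pop) rendered as a Lean cons-stack (top = head).
def stepA (st : List Char) (i : Char) : List Char :=
  match st with
  | [] => [i]                         -- len(stack)==0: append
  | top :: rest => if i = top then rest else i :: top :: rest

def solution (s : String) : Int :=
  let stack := s.toList.foldl stepA []
  if stack.length ≠ 0 then 0 else 1

-- ===== PORT B =====
-- one left-to-right scan deleting adjacent equal pairs (Source B's inner while loop)
def pass1 : List Char → List Char
  | [] => []
  | [a] => [a]
  | a :: b :: rest => if a = b then pass1 rest else a :: pass1 (b :: rest)

theorem pass1_length_le (l : List Char) : (pass1 l).length ≤ l.length := by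
  fun_induction pass1 l with
  | case1 => simp
  | case2 a => simp
  | case3 b rest ih => simp; omega
  | case4 a b rest h ih => simpa using ih

theorem pass1_progress (l : List Char) : pass1 l ≠ l → (pass1 l).length < l.length := by
  fun_induction pass1 l with
  | case1 => intro h; simp at h
  | case2 a => intro h; simp at h
  | case3 b rest ih =>
      intro _; have := pass1_length_le rest; simp; omega
  | case4 a b rest h ih =>
      intro hne
      have h' : pass1 (b :: rest) ≠ b :: rest := fun he => hne (by rw [he])
      have := ih h'
      simpa using Nat.succ_lt_succ this

-- Source B's outer while loop: iterate pass1 until the string stops changing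
def collapse (l : List Char) : List Char :=
  if h : pass1 l = l then l else collapse (pass1 l)
termination_by l.length
decreasing_by exact pass1_progress l h

def solution_alt (s : String) : Int :=
  if collapse s.toList = [] then 1 else 0

-- ===== PRECONDITION & SPEC =====
def Spec_solution (s : String) (out : Int) : Prop := out = solution_alt s
instance (s : String) (out : Int) : Decidable (Spec_solution s out) := by unfold Spec_solution; infer_instance

-- ===== CLAIM (what is proved, stated in full; the proofs are below) =====
def Claim_equal_solution : Prop := ∀ (s : String), Dom_solution s → Spec_solution s (solution s)

-- ===== LEMMAS AND PROOFS =====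

-- A's stack never holds two equal adjacent characters, and stepA preserves that.
theorem stepA_chain (st : List Char) (c : Char)
    (h : List.IsChain (· ≠ ·) st) : List.IsChain (· ≠ ·) (stepA st c) := by
  match st with
  | [] => simp [stepA]
  | top :: rest =>
      simp only [stepA]
      split
      · exact h.tail
      · exact List.isChain_cons_cons.mpr ⟨by assumption, h⟩

-- deleting one adjacent equal pair does not change A's final stack
theorem foldl_cancel (st : List Char) (c : Char) (ys : List Char)
    (h : List.IsChain (· ≠ ·) st) :
    List.foldl stepA st (c :: c :: ys) = List.foldl stepA st ys := by
  match st with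
  | [] => simp [stepA]
  | top :: rest =>
      by_cases hc : c = top
      · subst hc
        simp only [List.foldl, stepA]
        match rest with
        | [] => simp
        | r :: rs =>
            have : c ≠ r := (List.isChain_cons_cons.mp h).1
            simp [this]
      · simp [List.foldl, stepA, hc]

-- one collapsing pass leaves A's final stack unchanged
theorem foldl_pass1 (l : List Char) : ∀ (st : List Char),
    List.IsChain (· ≠ ·) st →
    List.foldl stepA st (pass1 l) = List.foldl stepA st l := by
  fun_induction pass1 l with
  | case1 => intro st _; rfl
  | case2 a => intro st _; rfl
  | case3 b rest ih =>
      intro st hst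
      rw [foldl_cancel st b rest hst]
      exact ih st hst
  | case4 a b rest h ih =>
      intro st hst
      simp only [List.foldl]
      exact ih (stepA st a) (stepA_chain st a hst)

-- on a pair-free list A's stack pass just reverses the list onto the stack
theorem foldl_nocancel (l : List Char) : ∀ (st : List Char),
    List.IsChain (· ≠ ·) l → List.IsChain (· ≠ ·) st →
    (∀ c, l.head? = some c → st.head? ≠ some c) →
    List.foldl stepA st l = l.reverse ++ st := by
  induction l with
  | nil => intro st _ _ _; simp
  | cons c rest ih =>
      intro st hl hst hhd
      have hstep : stepA st c = c :: st := by
        match st with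
        | [] => rfl
        | top :: r =>
            have : c ≠ top := fun he => hhd c rfl (by simp [he])
            simp [stepA, this]
      simp only [List.foldl, hstep]
      rw [ih (c :: st) hl.tail
          (List.IsChain.cons hst (by
            intro y hy he
            exact hhd c rfl (by rw [he]; exact hy)))
          (by
            intro d hd he
            have hcd : c = d := by simpa using he
            exact (List.isChain_cons.mp hl).1 d (by simpa using hd) hcd)]
      simp

-- a fixpoint of pass1 has no adjacent equal pair
theorem pass1_fix_chain (l : List Char) : pass1 l = l → List.IsChain (· ≠ ·) l := by
  fun_induction pass1 l with
  | case1 => intro _; simp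
  | case2 a => intro _; simp
  | case3 b rest ih =>
      intro h
      have h1 := congrArg List.length h
      have h2 := pass1_length_le rest
      simp at h1; omega
  | case4 a b rest h ih =>
      intro he
      injection he with _ h2
      exact List.isChain_cons_cons.mpr ⟨h, ih h2⟩

theorem collapse_spec (l : List Char) :
    List.foldl stepA [] (collapse l) = List.foldl stepA [] l ∧
    pass1 (collapse l) = collapse l := by
  fun_induction collapse l with
  | case1 l h => exact ⟨rfl, h⟩
  | case2 l _ ih =>
      refine ⟨?_, ih.2⟩
      rw [ih.1, foldl_pass1 l [] (by simp)]

theorem collapse_empty_iff (l : List Char) :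
    (collapse l = []) ↔ (List.foldl stepA [] l = []) := by
  obtain ⟨h1, h2⟩ := collapse_spec l
  have hchain := pass1_fix_chain _ h2
  have hrev : List.foldl stepA [] (collapse l) = (collapse l).reverse ++ [] :=
    foldl_nocancel (collapse l) [] hchain (by simp) (by simp)
  rw [hrev] at h1
  constructor
  · intro h; rw [h] at h1; simpa using h1.symm
  · intro h; rw [h] at h1; simpa using h1

-- ===== VERDICT (by name: the statement is the Claim_ definition above) =====
theorem solution_spec : Claim_equal_solution := by
  intro s _
  unfold Spec_solution solution solution_alt
  by_cases h : collapse s.toList = []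
  · rw [if_pos h]
    have he := (collapse_empty_iff s.toList).mp h
    simp [he]
  · rw [if_neg h]
    have hne : List.foldl stepA [] s.toList ≠ [] := fun he =>
      h ((collapse_empty_iff s.toList).mpr he)
    simp [hne]
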